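-- pv_equiv track=rewrite | github.com/IMNearth/DATA130007Social-Media-Mining | 2_community_seperation/util.py | _updatePartition
-- ===== SOURCE A (Python) =====
-- from collections import defaultdict
--
-- def _updatePartition(new_node2com, partition):
--     reverse_partition = defaultdict(list)
--     for node, com_id in partition.items():
--         reverse_partition[com_id].append(node)
--
--     for old_com_id, new_com_id in new_node2com.items():
--         for old_com in reverse_partition[old_com_id]:
--             partition[old_com] = new_com_id
--     return partition
-- ===== SOURCE B (Python) =====
-- def _updatePartition(new_node2com, partition):
--     # One flat pass over the nodes: look each node's community up in the
--     # mapping directly, instead of building a reverse community->nodes index.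
--     # Mutates `partition` in place and returns it, like the original.
--     for node, com_id in partition.items():
--         new_id = new_node2com.get(com_id)
--         if new_id is not None:
--             partition[node] = new_id
--     return partition
-- ===== Notes on version B (the rewrite author's own statement) =====
-- stated objective: simpler
-- what changed: Drops A's reverse community->nodes index (defaultdict built in a first pass, then a nested loop over the mapping and its node lists) in favour of one flat pass over partition.items() that looks each node's community up in new_node2com directly.
import Mathlib
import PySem

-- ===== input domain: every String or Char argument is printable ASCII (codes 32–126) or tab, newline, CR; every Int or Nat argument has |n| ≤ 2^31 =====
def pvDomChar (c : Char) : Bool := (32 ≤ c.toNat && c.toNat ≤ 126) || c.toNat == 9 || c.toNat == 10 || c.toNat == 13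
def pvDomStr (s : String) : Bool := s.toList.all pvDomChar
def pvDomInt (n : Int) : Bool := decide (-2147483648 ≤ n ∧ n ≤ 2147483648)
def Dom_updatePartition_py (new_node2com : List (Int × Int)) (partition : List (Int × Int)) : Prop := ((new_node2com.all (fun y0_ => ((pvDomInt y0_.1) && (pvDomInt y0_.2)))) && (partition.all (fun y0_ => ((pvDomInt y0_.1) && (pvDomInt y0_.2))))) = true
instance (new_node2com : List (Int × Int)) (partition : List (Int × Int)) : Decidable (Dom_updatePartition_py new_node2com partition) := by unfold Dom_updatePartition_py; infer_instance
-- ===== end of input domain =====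

-- B replaces A's reverse community->nodes index with one flat pass over the nodes (simpler).
-- Both Pythons mutate `partition` in place and return it; the equivalence proved is about the return value.

-- ===== PORT A =====
def updatePartition_py (new_node2com : List (Int × Int)) (partition : List (Int × Int)) : List (Int × Int) :=
  -- reverse_partition = defaultdict(list); for node, com_id in partition.items(): reverse_partition[com_id].append(node)
  let rev : PySem.Dict Int (List Int) :=
    partition.foldl (fun d p => d.modify p.2 [] (fun l => l ++ [p.1])) PySem.Dict.empty
  -- for old_com_id, new_com_id in new_node2com.items(): for old_com in reverse_partition[old_com_id]: partition[old_com] = new_com_id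
  -- (the defaultdict read `reverse_partition[old_com_id]` yields [] when absent; the empty entry
  --  it creates in `rev` is never read with a different result, so `getD _ []` is exact)
  (new_node2com.foldl
    (fun part q => ((rev.getD q.1 []).foldl (fun part node => part.insert node q.2) part))
    (PySem.Dict.mk partition)).items

-- ===== PORT B =====
def updatePartition_py_alt (new_node2com : List (Int × Int)) (partition : List (Int × Int)) : List (Int × Int) :=
  let N : PySem.Dict Int Int := PySem.Dict.mk new_node2com
  -- for node, com_id in partition.items(): new_id = new_node2com.get(com_id); if new_id is not None: partition[node] = new_id
  (partition.foldl
    (fun part p => match N.get? p.2 with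
      | some v => part.insert p.1 v
      | none => part)
    (PySem.Dict.mk partition)).items

-- ===== PRECONDITION & SPEC =====
-- Both parameters are Python dicts; Pre_ excludes association lists with duplicate keys,
-- which do not represent any Python dict input (every dict has unique keys).
def Pre_updatePartition_py (new_node2com : List (Int × Int)) (partition : List (Int × Int)) : Prop :=
  (new_node2com.map Prod.fst).Nodup ∧ (partition.map Prod.fst).Nodup
instance (new_node2com : List (Int × Int)) (partition : List (Int × Int)) : Decidable (Pre_updatePartition_py new_node2com partition) := by unfold Pre_updatePartition_py; infer_instance

def pvWitness_updatePartition_py : (List (Int × Int)) × (List (Int × Int)) := ([(0, 1)], [(2, 0), (3, 4)])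

def Spec_updatePartition_py (new_node2com : List (Int × Int)) (partition : List (Int × Int)) (out : List (Int × Int)) : Prop := out = updatePartition_py_alt new_node2com partition
instance (new_node2com : List (Int × Int)) (partition : List (Int × Int)) (out : List (Int × Int)) : Decidable (Spec_updatePartition_py new_node2com partition out) := by unfold Spec_updatePartition_py; infer_instance

-- ===== CLAIM (what is proved, stated in full; the proofs are below) =====
def Claim_equal_updatePartition_py : Prop := ∀ (new_node2com : List (Int × Int)) (partition : List (Int × Int)), Dom_updatePartition_py new_node2com partition → Pre_updatePartition_py new_node2com partition → Spec_updatePartition_py new_node2com partition (updatePartition_py new_node2com partition)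

-- ===== LEMMAS AND PROOFS =====

-- the per-node relabelling both programs compute
def pvF (N : PySem.Dict Int Int) (p : Int × Int) : Int × Int :=
  match N.get? p.2 with
  | some v => (p.1, v)
  | none => p

theorem pvF_fst (N : PySem.Dict Int Int) (p : Int × Int) : (pvF N p).1 = p.1 := by
  cases h : N.get? p.2 <;> simp [pvF, h]

theorem pvF_empty (p : Int × Int) : pvF (PySem.Dict.mk []) p = p := by
  simp [pvF, PySem.Dict.get?]

theorem items_insert_mid (d : PySem.Dict Int Int) (l1 l2 : List (Int × Int)) (k c v : Int)
    (hd : d.items = l1 ++ (k, c) :: l2)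
    (h1 : k ∉ l1.map Prod.fst) (h2 : k ∉ l2.map Prod.fst) :
    (d.insert k v).items = l1 ++ (k, v) :: l2 := by
  have hc : d.contains k = true := by
    rw [PySem.Dict.contains_iff_mem_keys]
    simp only [PySem.Dict.keys, hd]
    simp
  rw [PySem.Dict.items_insert_of_contains d v hc, hd]
  simp only [List.map_append, List.map_cons, BEq.rfl, if_pos]
  have e1 : l1.map (fun p => if (p.1 == k) = true then (k, v) else p)
      = l1.map (id : (Int × Int) → (Int × Int)) :=
    List.map_congr_left (fun p hp => by
      have hne : p.1 ≠ k := fun h => h1 (h ▸ List.mem_map_of_mem hp)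
      simp [hne])
  have e2 : l2.map (fun p => if (p.1 == k) = true then (k, v) else p)
      = l2.map (id : (Int × Int) → (Int × Int)) :=
    List.map_congr_left (fun p hp => by
      have hne : p.1 ≠ k := fun h => h2 (h ▸ List.mem_map_of_mem hp)
      simp [hne])
  rw [e1, e2]
  simp

-- first lookup of an appended association list
theorem get?_mk_append (l1 l2 : List (Int × Int)) (c : Int) :
    (PySem.Dict.mk (l1 ++ l2)).get? c = ((PySem.Dict.mk l1).get? c).or ((PySem.Dict.mk l2).get? c) := by
  induction l1 with
  | nil => simp [PySem.Dict.get?]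
  | cons q rest ih =>
    obtain ⟨k, v⟩ := q
    rw [List.cons_append, PySem.Dict.get?_mk_cons, PySem.Dict.get?_mk_cons]
    by_cases h : (k == c) = true <;> simp [h, ih]

-- B's single pass: fold the update over the remaining items of the (mutating) dict
theorem b_fold (N : PySem.Dict Int Int) (todo : List (Int × Int)) :
    ∀ (done : List (Int × Int)) (d : PySem.Dict Int Int),
    d.items = done.map (pvF N) ++ todo →
    ((done ++ todo).map Prod.fst).Nodup →
    (todo.foldl (fun part p => match N.get? p.2 with
        | some v => part.insert p.1 v
        | none => part) d).items = (done ++ todo).map (pvF N) := by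
  induction todo with
  | nil => intro done d hd _; simpa using hd
  | cons p rest ih =>
    intro done d hd hnd
    have hnd2 : (((done ++ [p]) ++ rest).map Prod.fst).Nodup := by
      rw [show (done ++ [p]) ++ rest = done ++ p :: rest by simp]
      exact hnd
    rw [List.foldl_cons]
    cases hN : N.get? p.2 with
    | none =>
      have hFp : pvF N p = p := by simp [pvF, hN]
      have := ih (done ++ [p]) d (by simpa [hFp] using hd) hnd2
      simpa using this
    | some v =>
      have hFp : pvF N p = (p.1, v) := by simp [pvF, hN]
      have hnd' := hnd
      simp only [List.map_append, List.map_cons, List.nodup_append, List.nodup_cons] at hnd'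
      have h1 : p.1 ∉ (done.map (pvF N)).map Prod.fst := by
        rw [List.map_map]
        rw [show (Prod.fst ∘ pvF N) = (Prod.fst : Int × Int → Int) from funext (pvF_fst N)]
        intro hmem
        exact (hnd'.2.2 p.1 hmem p.1 (by simp)) rfl
      have h2 : p.1 ∉ rest.map Prod.fst := hnd'.2.1.1
      have hins := items_insert_mid d (done.map (pvF N)) rest p.1 p.2 v
        (by simpa using hd) h1 h2
      have := ih (done ++ [p]) (d.insert p.1 v) (by simpa [hFp] using hins) hnd2
      simpa using this

-- splitting a nodup-keyed list at a present key
theorem split_at_key (base : List (Int × Int)) (n : Int)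
    (hnd : (base.map Prod.fst).Nodup) (hmem : n ∈ base.map Prod.fst) :
    ∃ b1 q b2, base = b1 ++ q :: b2 ∧ q.1 = n ∧ n ∉ b1.map Prod.fst ∧ n ∉ b2.map Prod.fst := by
  obtain ⟨q, hq, hqn⟩ := List.mem_map.mp hmem
  obtain ⟨b1, b2, hsplit⟩ := List.append_of_mem hq
  subst hsplit
  simp only [List.map_append, List.map_cons, hqn] at hnd
  obtain ⟨hn1, hn2, hdisj⟩ := List.nodup_append.mp hnd
  refine ⟨b1, q, b2, rfl, hqn, ?_, ?_⟩
  · exact fun hm => (hdisj n hm n (by simp)) rfl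
  · exact (List.nodup_cons.mp hn2).1

-- A's inner loop: set every node of `ns` to the value `nc`
theorem a_inner (base : List (Int × Int)) (hnd : (base.map Prod.fst).Nodup) (nc : Int)
    (ns : List Int) :
    ∀ (g : (Int × Int) → (Int × Int)) (d : PySem.Dict Int Int),
    (∀ p, (g p).1 = p.1) →
    d.items = base.map g →
    (∀ n ∈ ns, n ∈ base.map Prod.fst) →
    (ns.foldl (fun part node => part.insert node nc) d).items
      = base.map (fun p => if p.1 ∈ ns then (p.1, nc) else g p) := by
  induction ns with
  | nil => intro g d _ hd _; simpa using hd
  | cons n rest ih =>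
    intro g d hg hd hns
    obtain ⟨b1, q, b2, hsplit, hqn, hb1, hb2⟩ :=
      split_at_key base n hnd (hns n (by simp))
    have hb1' : n ∉ (b1.map g).map Prod.fst := by
      rw [List.map_map, show (Prod.fst ∘ g) = (Prod.fst : Int × Int → Int) from funext hg]
      exact hb1
    have hb2' : n ∉ (b2.map g).map Prod.fst := by
      rw [List.map_map, show (Prod.fst ∘ g) = (Prod.fst : Int × Int → Int) from funext hg]
      exact hb2
    have hgq : g q = (n, (g q).2) := by
      have := hg q; rw [hqn] at this
      exact Prod.ext this rfl
    have hins := items_insert_mid d (b1.map g) (b2.map g) n ((g q).2) nc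
      (by rw [hd, hsplit]; simp [← hgq]) hb1' hb2'
    set g' : (Int × Int) → (Int × Int) := fun p => if p.1 = n then (p.1, nc) else g p with hg'
    have hg'fst : ∀ p, (g' p).1 = p.1 := by
      intro p; by_cases h : p.1 = n <;> simp [hg', h, hg]
    have hd' : (d.insert n nc).items = base.map g' := by
      rw [hins, hsplit]
      simp only [List.map_append, List.map_cons]
      congr 1
      · exact (List.map_congr_left (fun p hp => by
          have : p.1 ≠ n := fun h => hb1 (h ▸ List.mem_map_of_mem hp)
          simp [hg', this])).symm
      · congr 1
        · simp [hg', hqn]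
        · exact (List.map_congr_left (fun p hp => by
            have : p.1 ≠ n := fun h => hb2 (h ▸ List.mem_map_of_mem hp)
            simp [hg', this])).symm
    rw [List.foldl_cons]
    rw [ih g' (d.insert n nc) hg'fst hd' (fun m hm => hns m (by simp [hm]))]
    apply List.map_congr_left
    intro p _
    by_cases h1 : p.1 ∈ rest
    · simp [h1]
    · by_cases h2 : p.1 = n <;> simp [h1, h2, hg']

-- the reverse index A builds: getD at c is the list of nodes whose community is c
theorem rev_getD (partition : List (Int × Int)) (c : Int) :
    (partition.foldl (fun d p => d.modify p.2 [] (fun l => l ++ [p.1])) PySem.Dict.empty).getD c []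
      = (partition.filter (fun p => p.2 == c)).map Prod.fst := by
  have h : partition.foldl (fun d p => d.modify p.2 [] (fun l => l ++ [p.1]))
      (PySem.Dict.empty : PySem.Dict Int (List Int))
      = (partition.map (fun p => (p.2, p.1))).foldl
          (fun d q => d.modify q.1 [] (fun l => l ++ [q.2])) PySem.Dict.empty := by
    rw [List.foldl_map]
  rw [h, PySem.Dict.getD_foldl_modify_append]
  simp [List.filter_map, Function.comp_def]

-- A's outer loop over the mapping, with the processed prefix P accumulated
theorem a_outer (partition : List (Int × Int)) (hpart : (partition.map Prod.fst).Nodup)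
    (todo : List (Int × Int)) :
    ∀ (P : List (Int × Int)) (d : PySem.Dict Int Int),
    ((P ++ todo).map Prod.fst).Nodup →
    d.items = partition.map (pvF (PySem.Dict.mk P)) →
    (todo.foldl
      (fun part q =>
        (((partition.foldl (fun d p => d.modify p.2 [] (fun l => l ++ [p.1])) PySem.Dict.empty).getD q.1 []).foldl
          (fun part node => part.insert node q.2) part)) d).items
      = partition.map (pvF (PySem.Dict.mk (P ++ todo))) := by
  induction todo with
  | nil => intro P d _ hd; simpa using hd
  | cons q rest ih =>
    intro P d hnd hd
    rw [List.foldl_cons, rev_getD]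
    have hnd' := hnd
    simp only [List.map_append, List.map_cons, List.nodup_append, List.nodup_cons] at hnd'
    have hqP : q.1 ∉ P.map Prod.fst := fun h => (hnd'.2.2 q.1 h q.1 (by simp)) rfl
    have hinner := a_inner partition hpart q.2
      ((partition.filter (fun p => p.2 == q.1)).map Prod.fst)
      (pvF (PySem.Dict.mk P)) d (pvF_fst _) hd
      (fun n hn => by
        obtain ⟨p, hp, hpn⟩ := List.mem_map.mp hn
        exact hpn ▸ List.mem_map_of_mem (List.mem_of_mem_filter hp))
    have hstep : partition.map
        (fun p => if p.1 ∈ (partition.filter (fun p => p.2 == q.1)).map Prod.fst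
                  then (p.1, q.2) else pvF (PySem.Dict.mk P) p)
        = partition.map (pvF (PySem.Dict.mk (P ++ [q]))) := by
      apply List.map_congr_left
      intro p hp
      have hmem_iff : p.1 ∈ (partition.filter (fun p => p.2 == q.1)).map Prod.fst ↔ p.2 = q.1 := by
        constructor
        · intro h
          obtain ⟨r, hr, hrp⟩ := List.mem_map.mp h
          have hrmem := List.mem_of_mem_filter hr
          have hrc : r.2 = q.1 := by simpa using List.of_mem_filter hr
          have : r = p := by
            by_contra hne
            exact hne (List.inj_on_of_nodup_map hpart hrmem hp hrp)
          rw [← this]; exact hrc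
        · intro h
          exact List.mem_map_of_mem (List.mem_filter.mpr ⟨hp, by simp [h]⟩)
      have hget : (PySem.Dict.mk (P ++ [q])).get? p.2
          = ((PySem.Dict.mk P).get? p.2).or ((PySem.Dict.mk [(q.1, q.2)]).get? p.2) := by
        rw [show (P ++ [q]) = (P ++ [(q.1, q.2)]) by simp]
        exact get?_mk_append P [(q.1, q.2)] p.2
      by_cases hc : p.2 = q.1
      · -- new entry fires: q.1 is not a key of P, so the P-lookup is none
        have hPnone : (PySem.Dict.mk P).get? p.2 = none := by
          rw [PySem.Dict.get?_eq_none_iff_not_mem_keys]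
          simpa [PySem.Dict.keys_mk, hc] using hqP
        have hsome : (PySem.Dict.mk (P ++ [q])).get? p.2 = some q.2 := by
          rw [hget, hPnone, PySem.Dict.get?_mk_cons]
          simp [hc]
        have hval : pvF (PySem.Dict.mk (P ++ [q])) p = (p.1, q.2) := by
          simp [pvF, hsome]
        rw [if_pos (hmem_iff.mpr hc), hval]
      · -- unaffected node: lookups in P ++ [q] and in P agree
        have hq' : q.1 ≠ p.2 := fun h => hc h.symm
        have hqnone : (PySem.Dict.mk [(q.1, q.2)]).get? p.2 = none := by
          rw [PySem.Dict.get?_mk_cons]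
          simp [hq', PySem.Dict.get?]
        have hgeteq : (PySem.Dict.mk (P ++ [q])).get? p.2 = (PySem.Dict.mk P).get? p.2 := by
          rw [hget, hqnone, Option.or_none]
        rw [if_neg (fun h => hc (hmem_iff.mp h))]
        simp [pvF, hgeteq]
    have hd' : ((((partition.filter (fun p => p.2 == q.1)).map Prod.fst).foldl
        (fun part node => part.insert node q.2) d)).items
        = partition.map (pvF (PySem.Dict.mk (P ++ [q]))) := hinner.trans hstep
    have hnd2 : (((P ++ [q]) ++ rest).map Prod.fst).Nodup := by
      rw [show (P ++ [q]) ++ rest = P ++ q :: rest by simp]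
      exact hnd
    have := ih (P ++ [q]) _ hnd2 hd'
    simpa using this

-- ===== VERDICT (by name: the statement is the Claim_ definition above) =====
theorem updatePartition_py_spec : Claim_equal_updatePartition_py := by
  intro new_node2com partition _ hpre
  obtain ⟨hnew, hpart⟩ := hpre
  unfold Spec_updatePartition_py updatePartition_py updatePartition_py_alt
  have hB := b_fold (PySem.Dict.mk new_node2com) partition [] (PySem.Dict.mk partition)
    (by simp) (by simpa using hpart)
  have hA := a_outer partition hpart new_node2com [] (PySem.Dict.mk partition)
    (by simpa using hnew)
    (by
      exact ((List.map_congr_left (fun p _ => (pvF_empty p).symm)).trans (List.map_id partition)).symm)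
  simp only [List.nil_append] at hA hB
  rw [hA, ← hB]
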